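-- pv_equiv track=rewrite | github.com/ipeternella/pyforces | challenges/hackerrank/the_grid_search.py | square_scan
-- ===== SOURCE A (Python) =====
-- def square_scan(g, p, r_g, c_g, r_p, c_p):
--     for r in range(r_g - r_p + 1):
--         for c in range(c_g - c_p + 1):
--             rows_match = True
--             columns_match = True
--
--             for j in range(c_p):
--                 for i in range(r_p):
--                     if g[r + i][c + j] != p[i][j]:
--                         rows_match = False
--                         break
--
--                 if not rows_match:
--                     columns_match = False
--                     break
--
--             if rows_match and columns_match:
--                 return True
--
--     return False
-- ===== SOURCE B (Python) =====
-- def square_scan(g, p, r_g, c_g, r_p, c_p):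
--     rows = r_g - r_p + 1
--     cols = c_g - c_p + 1
--     if rows <= 0 or cols <= 0:
--         return False
--     if r_p <= 0 or c_p <= 0:
--         return True
--     pat = [row[:c_p] for row in p[:r_p]]
--     first = pat[0]
--     for r in range(rows):
--         row = g[r]
--         c = row.find(first, 0)
--         while c != -1 and c < cols:
--             if all(g[r + i][c:c + c_p] == pat[i] for i in range(1, r_p)):
--                 return True
--             c = row.find(first, c + 1)
--     return False
-- ===== Notes on version B (the rewrite author's own statement) =====
-- stated objective: alternative
-- what changed: Replaces the four nested per-character loops with per-row candidate generation: str.find enumerates the occurrences of the pattern's first row inside each grid row and only those candidate columns are verified, by whole-row slice comparisons instead of char-by-char flags.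
-- outside the precondition, e.g. on square_scan(['ab', 'a'], ['b'], 2, 2, 1, 1): A returns True, B returns True
import Mathlib
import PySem

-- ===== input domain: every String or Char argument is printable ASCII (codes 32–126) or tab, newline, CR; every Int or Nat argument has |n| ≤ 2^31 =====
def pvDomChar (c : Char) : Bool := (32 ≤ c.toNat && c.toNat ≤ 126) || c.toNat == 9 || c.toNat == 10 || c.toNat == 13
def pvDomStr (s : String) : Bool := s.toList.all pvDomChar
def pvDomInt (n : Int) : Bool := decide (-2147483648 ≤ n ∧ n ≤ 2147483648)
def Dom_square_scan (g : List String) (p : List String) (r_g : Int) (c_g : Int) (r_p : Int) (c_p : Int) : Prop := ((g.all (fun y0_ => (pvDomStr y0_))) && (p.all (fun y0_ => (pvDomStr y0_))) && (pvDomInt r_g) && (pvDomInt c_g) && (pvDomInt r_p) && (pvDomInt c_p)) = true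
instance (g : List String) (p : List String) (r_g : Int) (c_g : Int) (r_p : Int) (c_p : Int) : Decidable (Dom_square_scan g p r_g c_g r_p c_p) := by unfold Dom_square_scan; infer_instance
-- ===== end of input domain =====

-- B replaces A's four nested per-character loops with per-row candidate search (str.find on the
-- pattern's first row) plus slice verification of the remaining rows.

-- ===== PORT A =====
-- g[i][j] as an Option (none exactly where Python raises IndexError; such inputs are outside Pre_)
def pvCharAt (xs : List String) (i j : Int) : Option Char :=
  (PySem.List.pyGet? xs i).bind (fun s => PySem.Str.pyGet? s j)

-- `for i in range(r_p)` : value of rows_match after the loop (break ⇒ false)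
def pvLoopI (g p : List String) (r c j : Int) : List Int → Bool
  | [] => true
  | i :: rest => if pvCharAt g (r + i) (c + j) ≠ pvCharAt p i j then false else pvLoopI g p r c j rest

-- `for j in range(c_p)` : value of rows_match ∧ columns_match after the loop
def pvLoopJ (g p : List String) (r c r_p : Int) : List Int → Bool
  | [] => true
  | j :: rest => if pvLoopI g p r c j (PySem.List.pyRange 0 r_p) then pvLoopJ g p r c r_p rest else false

-- `for c in range(c_g - c_p + 1)` with the early `return True` (Python's range is lazy, so the
-- loop is ported as counter recursion with early exit, not as a materialized list)
def pvLoopC (g p : List String) (r r_p c_p cols c : Int) : Bool :=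
  if c < cols then
    (if pvLoopJ g p r c r_p (PySem.List.pyRange 0 c_p) then true
     else pvLoopC g p r r_p c_p cols (c + 1))
  else false
termination_by (cols - c).toNat
decreasing_by omega

-- `for r in range(r_g - r_p + 1)` (counter recursion, same reason)
def pvLoopR (g p : List String) (r_p c_p c_g rows r : Int) : Bool :=
  if r < rows then
    (if pvLoopC g p r r_p c_p (c_g - c_p + 1) 0 then true
     else pvLoopR g p r_p c_p c_g rows (r + 1))
  else false
termination_by (rows - r).toNat
decreasing_by omega

def square_scan (g : List String) (p : List String) (r_g : Int) (c_g : Int) (r_p : Int) (c_p : Int) : Bool :=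
  pvLoopR g p r_p c_p c_g (r_g - r_p + 1) 0

-- ===== PORT B =====
-- `all(g[r + i][c:c + c_p] == pat[i] for i in range(1, r_p))`
def pvCheckRest (g : List String) (pat : List (List Char)) (r c c_p r_p : Int) : Bool :=
  (PySem.List.pyRange 1 r_p).all (fun i =>
    PySem.List.slice (PySem.List.pyGetD g (r + i) "").toList (some c) (some (c + c_p)) == PySem.List.pyGetD pat i [])

-- the `while c != -1 and c < cols` loop; `fuel` only makes the recursion structural (the proof
-- shows cols.toNat + 1 steps always suffice), it never changes the result
def pvScanRow (g : List String) (pat : List (List Char)) (row first : List Char)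
    (r cols c_p r_p : Int) : Int → Nat → Bool
  | _, 0 => false
  | c, fuel + 1 =>
    if c ≠ -1 ∧ c < cols then
      if pvCheckRest g pat r c c_p r_p then true
      else pvScanRow g pat row first r cols c_p r_p (PySem.Chars.findFrom row first (c + 1)) fuel
    else false

-- `for r in range(rows)` with `row = g[r]; c = row.find(first, 0)` (lazy range → counter recursion)
def pvRowsLoop (g : List String) (pat : List (List Char)) (first : List Char) (cols c_p r_p rows r : Int) : Bool :=
  if r < rows then
    let row := (PySem.List.pyGetD g r "").toList
    if pvScanRow g pat row first r cols c_p r_p (PySem.Chars.findFrom row first 0) (cols.toNat + 1) then true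
    else pvRowsLoop g pat first cols c_p r_p rows (r + 1)
  else false
termination_by (rows - r).toNat
decreasing_by omega

def square_scan_alt (g : List String) (p : List String) (r_g : Int) (c_g : Int) (r_p : Int) (c_p : Int) : Bool :=
  let rows := r_g - r_p + 1
  let cols := c_g - c_p + 1
  if rows ≤ 0 ∨ cols ≤ 0 then false
  else if r_p ≤ 0 ∨ c_p ≤ 0 then true
  else
    let pat := (PySem.List.slice p none (some r_p)).map (fun s => PySem.List.slice s.toList none (some c_p))
    let first := PySem.List.pyGetD pat 0 []
    pvRowsLoop g pat first cols c_p r_p rows 0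

-- ===== PRECONDITION & SPEC =====
-- Pre_ asks the declared dimensions not to exceed the actual grid/pattern sizes (unless a range is
-- empty or trivial, where nothing is indexed).  Outside it A usually raises IndexError; it also
-- excludes inputs with a too-short row that A never reaches thanks to an early `return True` —
-- that early return is an accident of scan order (cite in claim.json).
def Pre_square_scan (g : List String) (p : List String) (r_g : Int) (c_g : Int) (r_p : Int) (c_p : Int) : Prop :=
  (0 < r_g - r_p + 1 ∧ 0 < c_g - c_p + 1 ∧ 0 < r_p ∧ 0 < c_p) →
    (r_g ≤ g.length ∧ r_p ≤ p.length ∧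
     (∀ s ∈ g.take r_g.toNat, c_g ≤ s.toList.length) ∧
     (∀ s ∈ p.take r_p.toNat, c_p ≤ s.toList.length))
instance (g : List String) (p : List String) (r_g : Int) (c_g : Int) (r_p : Int) (c_p : Int) : Decidable (Pre_square_scan g p r_g c_g r_p c_p) := by unfold Pre_square_scan; infer_instance

def pvWitness_square_scan : List String × List String × Int × Int × Int × Int :=
  (["ab", "cd"], ["d"], 2, 2, 1, 1)

def Spec_square_scan (g : List String) (p : List String) (r_g : Int) (c_g : Int) (r_p : Int) (c_p : Int) (out : Bool) : Prop := out = square_scan_alt g p r_g c_g r_p c_p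
instance (g : List String) (p : List String) (r_g : Int) (c_g : Int) (r_p : Int) (c_p : Int) (out : Bool) : Decidable (Spec_square_scan g p r_g c_g r_p c_p out) := by unfold Spec_square_scan; infer_instance

-- ===== CLAIM (what is proved, stated in full; the proofs are below) =====
def Claim_equal_square_scan : Prop := ∀ (g : List String) (p : List String) (r_g : Int) (c_g : Int) (r_p : Int) (c_p : Int), Dom_square_scan g p r_g c_g r_p c_p → Pre_square_scan g p r_g c_g r_p c_p → Spec_square_scan g p r_g c_g r_p c_p (square_scan g p r_g c_g r_p c_p)

-- ===== LEMMAS AND PROOFS =====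

theorem pvWitness_ok :
    Dom_square_scan pvWitness_square_scan.1 pvWitness_square_scan.2.1 pvWitness_square_scan.2.2.1
      pvWitness_square_scan.2.2.2.1 pvWitness_square_scan.2.2.2.2.1 pvWitness_square_scan.2.2.2.2.2 ∧
    Pre_square_scan pvWitness_square_scan.1 pvWitness_square_scan.2.1 pvWitness_square_scan.2.2.1
      pvWitness_square_scan.2.2.2.1 pvWitness_square_scan.2.2.2.2.1 pvWitness_square_scan.2.2.2.2.2 := by
  decide


theorem pvLoopI_iff (g p : List String) (r c j : Int) (is_ : List Int) :
    pvLoopI g p r c j is_ = true ↔ ∀ i ∈ is_, pvCharAt g (r + i) (c + j) = pvCharAt p i j := by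
  induction is_ with
  | nil => simp [pvLoopI]
  | cons i rest ih =>
    by_cases h : pvCharAt g (r + i) (c + j) = pvCharAt p i j <;> simp [pvLoopI, h, ih]

theorem pvLoopJ_iff (g p : List String) (r c r_p : Int) (js : List Int) :
    pvLoopJ g p r c r_p js = true ↔ ∀ j ∈ js, pvLoopI g p r c j (PySem.List.pyRange 0 r_p) = true := by
  induction js with
  | nil => simp [pvLoopJ]
  | cons j rest ih =>
    by_cases h : pvLoopI g p r c j (PySem.List.pyRange 0 r_p) = true <;> simp [pvLoopJ, h, ih]

theorem pvLoopC_iff (g p : List String) (r r_p c_p cols : Int) (c : Int) :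
    pvLoopC g p r r_p c_p cols c = true ↔
      ∃ x : Int, c ≤ x ∧ x < cols ∧ pvLoopJ g p r x r_p (PySem.List.pyRange 0 c_p) = true := by
  have key : ∀ n : Nat, ∀ c : Int, (cols - c).toNat ≤ n →
      (pvLoopC g p r r_p c_p cols c = true ↔
        ∃ x : Int, c ≤ x ∧ x < cols ∧ pvLoopJ g p r x r_p (PySem.List.pyRange 0 c_p) = true) := by
    intro n
    induction n with
    | zero =>
      intro c hc
      rw [pvLoopC, if_neg (by omega)]
      constructor
      · intro h; simp at h
      · rintro ⟨x, hx⟩; omega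
    | succ n ih =>
      intro c hc
      rw [pvLoopC]
      by_cases hlt : c < cols
      · rw [if_pos hlt]
        by_cases hJ : pvLoopJ g p r c r_p (PySem.List.pyRange 0 c_p) = true
        · rw [if_pos hJ]
          exact ⟨fun _ => ⟨c, le_refl _, hlt, hJ⟩, fun _ => rfl⟩
        · rw [if_neg hJ, ih (c + 1) (by omega)]
          constructor
          · rintro ⟨x, h1, h2, h3⟩; exact ⟨x, by omega, h2, h3⟩
          · rintro ⟨x, h1, h2, h3⟩
            refine ⟨x, ?_, h2, h3⟩
            rcases eq_or_lt_of_le h1 with h | h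
            · subst h; exact absurd h3 hJ
            · omega
      · rw [if_neg hlt]
        constructor
        · intro h; simp at h
        · rintro ⟨x, hx⟩; omega
  exact key (cols - c).toNat c (le_refl _)

theorem pvLoopR_iff (g p : List String) (r_p c_p c_g rows : Int) (r : Int) :
    pvLoopR g p r_p c_p c_g rows r = true ↔
      ∃ x : Int, r ≤ x ∧ x < rows ∧ pvLoopC g p x r_p c_p (c_g - c_p + 1) 0 = true := by
  have key : ∀ n : Nat, ∀ r : Int, (rows - r).toNat ≤ n →
      (pvLoopR g p r_p c_p c_g rows r = true ↔
        ∃ x : Int, r ≤ x ∧ x < rows ∧ pvLoopC g p x r_p c_p (c_g - c_p + 1) 0 = true) := by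
    intro n
    induction n with
    | zero =>
      intro r hr
      rw [pvLoopR, if_neg (by omega)]
      constructor
      · intro h; simp at h
      · rintro ⟨x, hx⟩; omega
    | succ n ih =>
      intro r hr
      rw [pvLoopR]
      by_cases hlt : r < rows
      · rw [if_pos hlt]
        by_cases hC : pvLoopC g p r r_p c_p (c_g - c_p + 1) 0 = true
        · rw [if_pos hC]
          exact ⟨fun _ => ⟨r, le_refl _, hlt, hC⟩, fun _ => rfl⟩
        · rw [if_neg hC, ih (r + 1) (by omega)]
          constructor
          · rintro ⟨x, h1, h2, h3⟩; exact ⟨x, by omega, h2, h3⟩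
          · rintro ⟨x, h1, h2, h3⟩
            refine ⟨x, ?_, h2, h3⟩
            rcases eq_or_lt_of_le h1 with h | h
            · subst h; exact absurd h3 hC
            · omega
      · rw [if_neg hlt]
        constructor
        · intro h; simp at h
        · rintro ⟨x, hx⟩; omega
  exact key (rows - r).toNat r (le_refl _)

theorem pvRowsLoop_iff (g : List String) (pat : List (List Char)) (first : List Char)
    (cols c_p r_p rows : Int) (r : Int) :
    pvRowsLoop g pat first cols c_p r_p rows r = true ↔
      ∃ x : Int, r ≤ x ∧ x < rows ∧ pvScanRow g pat ((PySem.List.pyGetD g x "").toList) first x cols c_p r_p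
        (PySem.Chars.findFrom ((PySem.List.pyGetD g x "").toList) first 0) (cols.toNat + 1) = true := by
  have key : ∀ n : Nat, ∀ r : Int, (rows - r).toNat ≤ n →
      (pvRowsLoop g pat first cols c_p r_p rows r = true ↔
        ∃ x : Int, r ≤ x ∧ x < rows ∧ pvScanRow g pat ((PySem.List.pyGetD g x "").toList) first x cols c_p r_p
          (PySem.Chars.findFrom ((PySem.List.pyGetD g x "").toList) first 0) (cols.toNat + 1) = true) := by
    intro n
    induction n with
    | zero =>
      intro r hr
      rw [pvRowsLoop, if_neg (by omega)]
      constructor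
      · intro h; simp at h
      · rintro ⟨x, hx⟩; omega
    | succ n ih =>
      intro r hr
      rw [pvRowsLoop]
      by_cases hlt : r < rows
      · rw [if_pos hlt]
        simp only []
        by_cases hS : pvScanRow g pat ((PySem.List.pyGetD g r "").toList) first r cols c_p r_p
            (PySem.Chars.findFrom ((PySem.List.pyGetD g r "").toList) first 0) (cols.toNat + 1) = true
        · rw [if_pos hS]
          exact ⟨fun _ => ⟨r, le_refl _, hlt, hS⟩, fun _ => rfl⟩
        · rw [if_neg hS, ih (r + 1) (by omega)]
          constructor
          · rintro ⟨x, h1, h2, h3⟩; exact ⟨x, by omega, h2, h3⟩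
          · rintro ⟨x, h1, h2, h3⟩
            refine ⟨x, ?_, h2, h3⟩
            rcases eq_or_lt_of_le h1 with h | h
            · subst h; exact absurd h3 hS
            · omega
      · rw [if_neg hlt]
        constructor
        · intro h; simp at h
        · rintro ⟨x, hx⟩; omega
  exact key (rows - r).toNat r (le_refl _)

theorem pv_exists_int_iff {n : Nat} {P : Int → Prop} :
    (∃ x : Int, 0 ≤ x ∧ x < (n : Int) ∧ P x) ↔ ∃ m : Nat, m < n ∧ P (m : Int) := by
  constructor
  · rintro ⟨x, h0, h1, hP⟩
    refine ⟨x.toNat, by omega, ?_⟩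
    rwa [Int.toNat_of_nonneg h0]
  · rintro ⟨m, hm, hP⟩
    exact ⟨(m : Int), by positivity, by exact_mod_cast hm, hP⟩

theorem pv_forall_pyRange {a : Int} (ha : 0 ≤ a) {n : Nat} {P : Int → Prop} :
    (∀ x ∈ PySem.List.pyRange a (n : Int), P x) ↔ ∀ m : Nat, a ≤ (m : Int) → m < n → P (m : Int) := by
  constructor
  · intro h m h1 h2
    exact h _ (PySem.List.mem_pyRange_one.mpr ⟨h1, by exact_mod_cast h2⟩)
  · intro h x hx
    rw [PySem.List.mem_pyRange_one] at hx
    have h0 : 0 ≤ x := le_trans ha hx.1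
    have h1 : a ≤ ((x.toNat : Nat) : Int) := by rw [Int.toNat_of_nonneg h0]; exact hx.1
    have := h x.toNat h1 (by omega)
    rwa [Int.toNat_of_nonneg h0] at this

theorem pv_prefix_drop_infix {row first : List Char} {k cN : Nat} (hk : k ≤ cN)
    (h : first <+: row.drop cN) : first <:+: row.drop k := by
  have hdd : row.drop cN = (row.drop k).drop (cN - k) := by
    rw [List.drop_drop]; congr 1; omega
  rw [hdd] at h
  exact h.isInfix.trans (List.drop_suffix _ _).isInfix

theorem pvScanRow_iff (g : List String) (pat : List (List Char)) (row first : List Char)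
    (r c_p r_p : Int) (colsN : Nat) (hrow : colsN ≤ row.length) :
    ∀ (fuel k : Nat), k ≤ colsN → colsN + 1 ≤ fuel + k →
    (pvScanRow g pat row first r (colsN : Int) c_p r_p (PySem.Chars.findFrom row first (k : Int)) fuel = true ↔
      ∃ cN : Nat, k ≤ cN ∧ cN < colsN ∧ first <+: row.drop cN ∧
        pvCheckRest g pat r (cN : Int) c_p r_p = true) := by
  intro fuel
  induction fuel with
  | zero => intro k h1 h2; omega
  | succ fuel ih =>
    intro k hk hfuel
    have hkr : k ≤ row.length := le_trans hk hrow
    by_cases hf : PySem.Chars.findFrom row first (k : Int) = -1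
    · have hni : ¬ first <:+: row.drop k :=
        (PySem.Chars.findFrom_natCast_eq_neg_one_iff row first k hkr).mp hf
      simp only [pvScanRow, hf]
      constructor
      · intro h; simp at h
      · rintro ⟨cN, h1, h2, h3, h4⟩
        exact absurd (pv_prefix_drop_infix h1 h3) hni
    · obtain ⟨hkf, hpre, hmin⟩ := PySem.Chars.findFrom_natCast_spec row first k hkr hf
      set f := PySem.Chars.findFrom row first (k : Int) with hfdef
      have hf0 : 0 ≤ f := le_trans (by positivity) hkf
      have hfN : ((f.toNat : Nat) : Int) = f := Int.toNat_of_nonneg hf0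
      by_cases hlt : f < (colsN : Int)
      · have hfNlt : f.toNat < colsN := by omega
        by_cases hchk : pvCheckRest g pat r f c_p r_p = true
        · simp only [pvScanRow, hf, hlt, hchk, if_true, and_true, ne_eq, not_false_iff]
          constructor
          · intro _
            exact ⟨f.toNat, by omega, hfNlt, hpre, by rwa [hfN]⟩
          · intro _; simp
        · have hstep : pvScanRow g pat row first r (colsN : Int) c_p r_p f (fuel + 1) =
              pvScanRow g pat row first r (colsN : Int) c_p r_p
                (PySem.Chars.findFrom row first (f + 1)) fuel := by
            simp only [pvScanRow, hlt, hchk]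
            simp [hf]
          have hcast : f + 1 = (((f.toNat + 1 : Nat)) : Int) := by push_cast; omega
          rw [hstep, hcast, ih (f.toNat + 1) (by omega) (by omega)]
          constructor
          · rintro ⟨cN, h1, h2, h3, h4⟩
            exact ⟨cN, by omega, h2, h3, h4⟩
          · rintro ⟨cN, h1, h2, h3, h4⟩
            refine ⟨cN, ?_, h2, h3, h4⟩
            rcases Nat.lt_trichotomy cN f.toNat with hc | hc | hc
            · exact absurd h3 (hmin cN h1 hc)
            · subst hc; rw [hfN] at h4; exact absurd h4 hchk
            · omega
      · simp only [pvScanRow]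
        constructor
        · intro h
          have : ¬ (f ≠ -1 ∧ f < (colsN : Int)) := fun hc => hlt hc.2
          simp only [this, if_false] at h
          exact absurd h (by simp)
        · rintro ⟨cN, h1, h2, h3, h4⟩
          have : cN < f.toNat := by omega
          exact absurd h3 (hmin cN h1 this)

theorem pv_window_eq_iff {α : Type} {gr pr : List α} {cN CN : Nat} :
    ((gr.drop cN).take CN = pr.take CN) ↔ ∀ jN : Nat, jN < CN → gr[cN + jN]? = pr[jN]? := by
  constructor
  · intro h jN hj
    have := congrArg (fun l => l[jN]?) h
    simpa [List.getElem?_drop, hj] using this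
  · intro h
    apply List.ext_getElem?
    intro j
    by_cases hj : j < CN
    · simpa [List.getElem?_drop, hj] using h j hj
    · simp [hj]

theorem pv_charAt_eq (xs : List String) (aN bN : Nat) (ha : aN < xs.length) :
    pvCharAt xs ((aN : Nat) : Int) ((bN : Nat) : Int) = (xs.getD aN "").toList[bN]? := by
  unfold pvCharAt
  rw [PySem.List.pyGet?_natCast, List.getElem?_eq_getElem ha, List.getD_eq_getElem _ _ ha]
  simp

theorem pv_mem_take_of_lt {α : Type} {xs : List α} {i n : Nat} (hi : i < n) (h : i < xs.length) :
    xs[i] ∈ xs.take n := by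
  have hl : i < (xs.take n).length := by simp [List.length_take]; omega
  have : (xs.take n)[i] = xs[i] := List.getElem_take
  rw [← this]
  exact List.getElem_mem hl

theorem pv_pos_bridge (g p : List String) (r_g c_g r_p c_p : Int)
    (hr_p : 0 < r_p) (_hc_p : 0 < c_p)
    (hg : r_g ≤ g.length) (hp : r_p ≤ p.length)
    (hgc : ∀ s ∈ g.take r_g.toNat, c_g ≤ s.toList.length)
    (hpc : ∀ s ∈ p.take r_p.toNat, c_p ≤ s.toList.length)
    (rN cN : Nat) (hrN : (rN : Int) < r_g - r_p + 1) (_hcN : (cN : Int) < c_g - c_p + 1) :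
    ((∀ jN : Nat, jN < c_p.toNat → ∀ iN : Nat, iN < r_p.toNat →
        pvCharAt g ((rN : Int) + (iN : Int)) ((cN : Int) + (jN : Int)) = pvCharAt p (iN : Int) (jN : Int))
      ↔ (∀ iN : Nat, iN < r_p.toNat →
          (((g.getD (rN + iN) "").toList.drop cN).take c_p.toNat
            = (p.getD iN "").toList.take c_p.toNat))) := by
  have hswap : (∀ jN : Nat, jN < c_p.toNat → ∀ iN : Nat, iN < r_p.toNat →
        pvCharAt g ((rN : Int) + (iN : Int)) ((cN : Int) + (jN : Int)) = pvCharAt p (iN : Int) (jN : Int))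
      ↔ (∀ iN : Nat, iN < r_p.toNat → ∀ jN : Nat, jN < c_p.toNat →
        pvCharAt g ((rN : Int) + (iN : Int)) ((cN : Int) + (jN : Int)) = pvCharAt p (iN : Int) (jN : Int)) := by
    constructor
    · intro h i hi j hj; exact h j hj i hi
    · intro h j hj i hi; exact h i hi j hj
  rw [hswap]
  apply forall_congr'
  intro iN
  apply imp_congr_right
  intro hiN
  -- index facts
  have hgi : rN + iN < g.length := by omega
  have hgi' : rN + iN < r_g.toNat := by omega
  have hpi : iN < p.length := by omega
  have hpi' : iN < r_p.toNat := hiN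
  have hglen : c_g ≤ ((g.getD (rN + iN) "").toList.length : Int) := by
    rw [List.getD_eq_getElem _ _ hgi]
    exact hgc _ (pv_mem_take_of_lt hgi' hgi)
  have hplen : c_p ≤ ((p.getD iN "").toList.length : Int) := by
    rw [List.getD_eq_getElem _ _ hpi]
    exact hpc _ (pv_mem_take_of_lt hpi' hpi)
  rw [pv_window_eq_iff]
  apply forall_congr'
  intro jN
  apply imp_congr_right
  intro hjN
  rw [show ((rN : Int) + (iN : Int)) = ((rN + iN : Nat) : Int) by push_cast; ring,
      show ((cN : Int) + (jN : Int)) = ((cN + jN : Nat) : Int) by push_cast; ring,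
      pv_charAt_eq g _ _ hgi, pv_charAt_eq p _ _ hpi]

theorem pv_scan_row_iff (g p : List String) (r_g c_g r_p c_p : Int)
    (pat : List (List Char)) (first : List Char)
    (hr_p : 0 < r_p) (hc_p : 0 < c_p) (hcols : 0 < c_g - c_p + 1)
    (hg : r_g ≤ g.length) (hp : r_p ≤ p.length)
    (hgc : ∀ s ∈ g.take r_g.toNat, c_g ≤ s.toList.length)
    (hpc : ∀ s ∈ p.take r_p.toNat, c_p ≤ s.toList.length)
    (hpat : pat = (p.take r_p.toNat).map (fun s => s.toList.take c_p.toNat))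
    (hfirst : first = (p.getD 0 "").toList.take c_p.toNat)
    (rN : Nat) (hrN : (rN : Int) < r_g - r_p + 1) :
    (pvScanRow g pat ((PySem.List.pyGetD g (rN : Int) "").toList) first (rN : Int)
        (c_g - c_p + 1) c_p r_p
        (PySem.Chars.findFrom ((PySem.List.pyGetD g (rN : Int) "").toList) first 0)
        ((c_g - c_p + 1).toNat + 1) = true)
      ↔ ∃ cN : Nat, (cN : Int) < c_g - c_p + 1 ∧ ∀ iN : Nat, iN < r_p.toNat →
          (((g.getD (rN + iN) "").toList.drop cN).take c_p.toNat
            = (p.getD iN "").toList.take c_p.toNat) := by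
  have hrg1 : rN < g.length := by omega
  have hrg2 : rN < r_g.toNat := by omega
  have hrow_eq : (PySem.List.pyGetD g (rN : Int) "").toList = (g.getD rN "").toList := by
    rw [PySem.List.pyGetD_of_nonneg _ _ (by positivity)]
    simp
  set row : List Char := (PySem.List.pyGetD g (rN : Int) "").toList with hrowdef
  have hrowlen : c_g ≤ (row.length : Int) := by
    rw [hrow_eq, List.getD_eq_getElem _ _ hrg1]
    exact hgc _ (pv_mem_take_of_lt hrg2 hrg1)
  set colsN : Nat := (c_g - c_p + 1).toNat with hcolsdef
  have hc : c_g - c_p + 1 = (colsN : Int) := by omega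
  have hrowb : colsN ≤ row.length := by omega
  have hp0 : 0 < p.length := by omega
  have hp0len : c_p ≤ ((p.getD 0 "").toList.length : Int) := by
    rw [List.getD_eq_getElem _ _ hp0]
    exact hpc _ (pv_mem_take_of_lt (by omega) hp0)
  have hfl : first.length = c_p.toNat := by
    rw [hfirst, List.length_take]
    omega
  have hpatlen : pat.length = r_p.toNat := by
    rw [hpat, List.length_map, List.length_take]
    omega
  have hpati : ∀ iN : Nat, iN < r_p.toNat →
      pat.getD iN [] = (p.getD iN "").toList.take c_p.toNat := by
    intro iN hiN
    have hip : iN < p.length := by omega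
    rw [hpat]
    have h1 : iN < ((p.take r_p.toNat).map (fun s => List.take c_p.toNat s.toList)).length := by
      simp [List.length_take]
      omega
    rw [List.getD_eq_getElem _ _ h1, List.getD_eq_getElem _ _ hip]
    simp [List.getElem_take]
  rw [hc, show (0 : Int) = ((0 : Nat) : Int) by simp,
    pvScanRow_iff g pat row first (rN : Int) c_p r_p colsN hrowb
      ((colsN : Nat) + 1) 0 (Nat.zero_le _) (by omega)]
  apply exists_congr
  intro cN
  constructor
  · rintro ⟨-, hlt, hprefix, hchk⟩
    refine ⟨by omega, ?_⟩
    -- the first row from the prefix, the others from pvCheckRest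
    have h0 : ((g.getD (rN + 0) "").toList.drop cN).take c_p.toNat
        = (p.getD 0 "").toList.take c_p.toNat := by
      rw [List.prefix_iff_eq_take, hfl] at hprefix
      simpa [hrow_eq, hfirst] using hprefix.symm
    have hrest : ∀ iN : Nat, 1 ≤ (iN : Int) → iN < r_p.toNat →
        (((g.getD (rN + iN) "").toList.drop cN).take c_p.toNat
          = (p.getD iN "").toList.take c_p.toNat) := by
      unfold pvCheckRest at hchk
      rw [List.all_eq_true] at hchk
      have hrp : r_p = ((r_p.toNat : Nat) : Int) := by omega
      rw [hrp, pv_forall_pyRange (by norm_num)] at hchk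
      intro iN h1 h2
      have := hchk iN h1 h2
      rw [beq_iff_eq] at this
      rw [show ((cN : Int) + c_p) = ((cN : Int) + ((c_p.toNat : Nat) : Int)) by omega,
        PySem.List.slice_natCast_add,
        PySem.List.pyGetD_of_nonneg pat ([] : List Char) (by positivity),
        show ((iN : Int)).toNat = iN by omega, hpati iN h2,
        PySem.List.pyGetD_of_nonneg g "" (by positivity),
        show (((rN : Int) + (iN : Int)).toNat) = rN + iN by omega] at this
      simpa using this
    intro iN hiN
    rcases Nat.eq_zero_or_pos iN with h | h
    · subst h; exact h0
    · exact hrest iN (by exact_mod_cast h) hiN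
  · rintro ⟨hlt, hall⟩
    refine ⟨Nat.zero_le _, by omega, ?_, ?_⟩
    · rw [List.prefix_iff_eq_take, hfl]
      have := (hall 0 (by omega)).symm
      simpa [hrow_eq, hfirst] using this
    · unfold pvCheckRest
      rw [List.all_eq_true]
      have hrp : r_p = ((r_p.toNat : Nat) : Int) := by omega
      rw [hrp, pv_forall_pyRange (by norm_num)]
      intro iN h1 h2
      rw [beq_iff_eq,
        show ((cN : Int) + c_p) = ((cN : Int) + ((c_p.toNat : Nat) : Int)) by omega,
        PySem.List.slice_natCast_add,
        PySem.List.pyGetD_of_nonneg pat ([] : List Char) (by positivity),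
        show ((iN : Int)).toNat = iN by omega, hpati iN h2,
        PySem.List.pyGetD_of_nonneg g "" (by positivity),
        show (((rN : Int) + (iN : Int)).toNat) = rN + iN by omega]
      simpa using hall iN h2

theorem pv_inner_A_iff (g p : List String) (r c r_p c_p : Int) (CN RN : Nat)
    (hcp : c_p = (CN : Int)) (hrp : r_p = (RN : Int)) :
    (pvLoopJ g p r c r_p (PySem.List.pyRange 0 c_p) = true) ↔
      (∀ jN : Nat, jN < CN → ∀ iN : Nat, iN < RN →
        pvCharAt g (r + (iN : Int)) (c + (jN : Int)) = pvCharAt p (iN : Int) (jN : Int)) := by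
  subst hcp hrp
  rw [pvLoopJ_iff, pv_forall_pyRange (by norm_num)]
  constructor
  · intro h jN hj iN hi
    exact (pvLoopI_iff _ _ _ _ _ _).mp (h jN (by positivity) hj) (iN : Int)
      (PySem.List.mem_pyRange_one.mpr ⟨by positivity, by exact_mod_cast hi⟩)
  · intro h jN _ hj
    rw [pvLoopI_iff]
    intro i hi
    rw [PySem.List.mem_pyRange_one] at hi
    have := h jN hj i.toNat (by omega)
    rwa [Int.toNat_of_nonneg hi.1] at this

-- ===== VERDICT (by name: the statement is the Claim_ definition above) =====
theorem square_scan_spec : Claim_equal_square_scan := by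
  intro g p r_g c_g r_p c_p _hDom hPre
  unfold Spec_square_scan
  rw [show ∀ a b : Bool, (a = b) ↔ ((a = true) ↔ (b = true)) from fun a b => by
    cases a <;> cases b <;> simp]
  by_cases h1 : r_g - r_p + 1 ≤ 0 ∨ c_g - c_p + 1 ≤ 0
  · -- an empty scan range: both programs return False
    have hB : square_scan_alt g p r_g c_g r_p c_p = false := by
      simp only [square_scan_alt]
      rw [if_pos h1]
    rw [hB, square_scan, pvLoopR_iff]
    simp only [Bool.false_eq_true, iff_false, not_exists]
    intro x hx
    rcases h1 with h | h
    · omega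
    · have := hx.2.2
      rw [pvLoopC_iff] at this
      obtain ⟨y, hy⟩ := this
      omega
  · have hrows : 0 < r_g - r_p + 1 := by omega
    have hcols : 0 < c_g - c_p + 1 := by omega
    by_cases h2 : r_p ≤ 0 ∨ c_p ≤ 0
    · -- a trivial (empty) pattern: both programs return True
      have hB : square_scan_alt g p r_g c_g r_p c_p = true := by
        simp only [square_scan_alt]
        rw [if_neg (by omega), if_pos h2]
      rw [hB, square_scan, pvLoopR_iff]
      simp only [iff_true]
      refine ⟨0, le_refl _, by omega, ?_⟩
      rw [pvLoopC_iff]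
      refine ⟨0, le_refl _, by omega, ?_⟩
      rw [pvLoopJ_iff]
      intro j hj
      rcases h2 with h | h
      · rw [PySem.List.pyRange_one_eq_nil h, pvLoopI_iff]
        simp
      · rw [PySem.List.pyRange_one_eq_nil h] at hj
        simp at hj
    · have hr_p : 0 < r_p := by omega
      have hc_p : 0 < c_p := by omega
      obtain ⟨hg, hp, hgc, hpc⟩ := hPre ⟨by omega, by omega, hr_p, hc_p⟩
      set rowsN : Nat := (r_g - r_p + 1).toNat with hrowsdef
      set colsN : Nat := (c_g - c_p + 1).toNat with hcolsdef
      have hrowsc : r_g - r_p + 1 = (rowsN : Int) := by omega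
      have hcolsc : c_g - c_p + 1 = (colsN : Int) := by omega
      have hcpc : c_p = ((c_p.toNat : Nat) : Int) := by omega
      have hrpc : r_p = ((r_p.toNat : Nat) : Int) := by omega
      -- the common middle form: a match position described by whole-row windows
      have hA : (square_scan g p r_g c_g r_p c_p = true) ↔
          (∃ rN : Nat, rN < rowsN ∧ ∃ cN : Nat, cN < colsN ∧
            ∀ iN : Nat, iN < r_p.toNat →
              (((g.getD (rN + iN) "").toList.drop cN).take c_p.toNat
                = (p.getD iN "").toList.take c_p.toNat)) := by
        rw [square_scan, pvLoopR_iff, hrowsc, pv_exists_int_iff]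
        apply exists_congr; intro rN
        apply and_congr_right; intro hrN
        rw [pvLoopC_iff, hcolsc, pv_exists_int_iff]
        apply exists_congr; intro cN
        apply and_congr_right; intro hcN
        rw [pv_inner_A_iff g p _ _ _ _ c_p.toNat r_p.toNat hcpc hrpc]
        exact pv_pos_bridge g p r_g c_g r_p c_p hr_p hc_p hg hp hgc hpc rN cN
          (by omega) (by omega)
      have hpat : (PySem.List.slice p none (some r_p)).map
            (fun s => PySem.List.slice s.toList none (some c_p))
          = (p.take r_p.toNat).map (fun s => s.toList.take c_p.toNat) := by
        rw [PySem.List.slice_to p (le_of_lt hr_p)]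
        simp only [PySem.List.slice_to _ (le_of_lt hc_p)]
      have hfirst : PySem.List.pyGetD ((p.take r_p.toNat).map
            (fun s => s.toList.take c_p.toNat)) 0 []
          = (p.getD 0 "").toList.take c_p.toNat := by
        have hlen : 0 < ((p.take r_p.toNat).map (fun s => s.toList.take c_p.toNat)).length := by
          simp [List.length_take]
          omega
        rw [PySem.List.pyGetD_of_nonneg _ _ (le_refl 0), List.getD_eq_getElem _ _ (by simpa using hlen),
          List.getD_eq_getElem _ _ (by omega : 0 < p.length)]
        simp [List.getElem_take]
      have hB : (square_scan_alt g p r_g c_g r_p c_p = true) ↔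
          (∃ rN : Nat, rN < rowsN ∧ ∃ cN : Nat, cN < colsN ∧
            ∀ iN : Nat, iN < r_p.toNat →
              (((g.getD (rN + iN) "").toList.drop cN).take c_p.toNat
                = (p.getD iN "").toList.take c_p.toNat)) := by
        have hred : square_scan_alt g p r_g c_g r_p c_p
            = pvRowsLoop g ((p.take r_p.toNat).map (fun s => s.toList.take c_p.toNat))
                ((p.getD 0 "").toList.take c_p.toNat) (c_g - c_p + 1) c_p r_p
                (r_g - r_p + 1) 0 := by
          simp only [square_scan_alt]
          rw [if_neg (by omega), if_neg (by omega), hpat, hfirst]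
        rw [hred, pvRowsLoop_iff, hrowsc, pv_exists_int_iff]
        apply exists_congr; intro rN
        apply and_congr_right; intro hrN
        rw [pv_scan_row_iff g p r_g c_g r_p c_p _ _ hr_p hc_p (by omega) hg hp hgc hpc rfl rfl
          rN (by omega)]
        apply exists_congr; intro cN
        apply and_congr_left'
        omega
      exact hA.trans hB.symm
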